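-- pv_equiv track=rewrite | github.com/NicolasSimard/numth | quadratic.py | fund_decomp
-- ===== SOURCE A (Python) =====
-- from math import sqrt
--
-- def is_discriminant(D):
--     return D % 4 == 0 or D % 4 == 1
--
-- def fund_decomp(D):
--     """Return a decomposition D = f**2 D_K with D_K a fundamental discriminant.
--
--     Example:
--     >>> fund_decomp(-4)
--     (-4, 1)
--     >>> fund_decomp(-8)
--     (-8, 1)
--     >>> fund_decomp(-12)
--     (-3, 2)
--     >>> fund_decomp(20)
--     (5, 2)
--     """
--
--     assert is_discriminant(D), "Not a discriminant!"
--     f = int(sqrt(abs(D)))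
--     while not D % f**2 == 0: f -= 1
--     # At this point, D = f**2 sf_D, where sf_D % 4 == 1,2 or 3 is square-free.
--     sf_D = D//(f**2)
--     if sf_D % 4 == 1:
--         return (sf_D, f)
--     else:
--         return (4*sf_D, f//2)
-- ===== SOURCE B (Python) =====
-- def fund_decomp(D):
--     """Return a decomposition D = f**2 D_K with D_K a fundamental discriminant."""
--     assert D % 4 == 0 or D % 4 == 1, "Not a discriminant!"
--     assert D != 0, "0 has no fundamental decomposition"
--     # extract the square part of |D| by ascending trial division by d**2
--     n = abs(D)
--     f = 1
--     d = 2
--     while d * d <= n: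
--         while n % (d * d) == 0:
--             n //= d * d
--             f *= d
--         d += 1
--     sf_D = D // (f * f)
--     if sf_D % 4 == 1:
--         return (sf_D, f)
--     else:
--         return (4 * sf_D, f // 2)
-- ===== Notes on version B (the rewrite author's own statement) =====
-- stated objective: alternative
-- what changed: B computes the square part f of |D| by ascending trial division (repeatedly dividing out d*d and collecting d into f) instead of A's downward search from int(sqrt(|D|)) for the largest f with f**2 | D; the final fundamental-discriminant branch is unchanged. Pre_ excludes non-discriminants (A raises AssertionError) and D = 0 (A raises ZeroDivisionError; B raises AssertionError there).
-- outside the precondition, e.g. on fund_decomp(0): A raises ZeroDivisionError, B raises AssertionError; on fund_decomp(2): A raises AssertionError, B raises AssertionError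
import Mathlib
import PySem

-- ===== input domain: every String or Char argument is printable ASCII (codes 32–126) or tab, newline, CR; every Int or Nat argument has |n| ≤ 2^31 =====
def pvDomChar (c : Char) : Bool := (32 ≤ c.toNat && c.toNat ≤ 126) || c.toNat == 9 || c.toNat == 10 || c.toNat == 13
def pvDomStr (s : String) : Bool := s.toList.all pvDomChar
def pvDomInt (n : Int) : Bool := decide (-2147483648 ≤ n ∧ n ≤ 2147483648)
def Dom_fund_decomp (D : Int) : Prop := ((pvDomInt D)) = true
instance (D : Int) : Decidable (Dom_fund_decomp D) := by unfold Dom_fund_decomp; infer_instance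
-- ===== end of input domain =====

-- B extracts the square part of |D| by ascending trial division (dividing out d*d and collecting d into f)
-- instead of A's downward search for the largest f ≤ ⌊√|D|⌋ with f² | D; same final fundamental-discriminant branch.

-- ===== PORT A =====
-- 'while not D % f**2 == 0: f -= 1', recursion on f.  Python raises ZeroDivisionError at f = 0,
-- which is reached only for D = 0 (excluded by Pre_); the total port returns 0 there.
def aLoop (D : Int) : Nat → Nat
  | 0 => 0
  | f+1 => if PySem.Int.mod D (((f : Int)+1)^2) == 0 then f+1 else aLoop D f

-- f = int(sqrt(abs(D))) is ported as Nat.sqrt: on |D| ≤ 2^31 the float start value is ⌊√|D|⌋ or ⌊√|D|⌋+1,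
-- and a start one too high fails the loop's first divisibility test, so the computed result is identical.
def fund_decomp (D : Int) : Int × Int :=
  let f : Int := (aLoop D (Nat.sqrt D.natAbs) : Nat)
  let sf := PySem.Int.floordiv D (f^2)
  if PySem.Int.mod sf 4 == 1 then (sf, f) else (4*sf, PySem.Int.floordiv f 2)

-- ===== PORT B =====
-- inner 'while n % (d*d) == 0: n //= d*d; f *= d' — structural recursion on a fuel bound
-- (fuel = the current n suffices: n strictly shrinks each division; fuel never runs out at a reachable call)
def bInner : Nat → Nat → Nat → Nat → Nat × Nat
  | 0, _, n, f => (n, f)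
  | fuel+1, d, n, f => if n % (d*d) = 0 then bInner fuel d (n / (d*d)) (f*d) else (n, f)

-- outer 'while d*d <= n: … ; d += 1' — fuel = the initial n bounds the number of d increments
def bOuter : Nat → Nat → Nat → Nat → Nat
  | 0, _, f, _ => f
  | fuel+1, n, f, d =>
    if d*d ≤ n then bOuter fuel (bInner n d n f).1 (bInner n d n f).2 (d+1) else f

def fund_decomp_alt (D : Int) : Int × Int :=
  let n := D.natAbs
  let f : Int := (bOuter n n 1 2 : Nat)
  let sf := PySem.Int.floordiv D (f*f)
  if PySem.Int.mod sf 4 == 1 then (sf, f) else (4*sf, PySem.Int.floordiv f 2)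

-- ===== PRECONDITION & SPEC =====
-- Pre_ = exactly where Python A returns: D ≡ 0,1 (mod 4) (else AssertionError) and D ≠ 0
-- (else ZeroDivisionError in A; B asserts there, so both raise).
def Pre_fund_decomp (D : Int) : Prop :=
  (PySem.Int.mod D 4 = 0 ∨ PySem.Int.mod D 4 = 1) ∧ D ≠ 0
instance (D : Int) : Decidable (Pre_fund_decomp D) := by unfold Pre_fund_decomp; infer_instance
def pvWitness_fund_decomp : Int := 20

def Spec_fund_decomp (D : Int) (out : Int × Int) : Prop := out = fund_decomp_alt D
instance (D : Int) (out : Int × Int) : Decidable (Spec_fund_decomp D out) := by unfold Spec_fund_decomp; infer_instance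

-- ===== CLAIM (what is proved, stated in full; the proofs are below) =====
def Claim_equal_fund_decomp : Prop := ∀ (D : Int), Dom_fund_decomp D → Pre_fund_decomp D → Spec_fund_decomp D (fund_decomp D)

-- ===== LEMMAS AND PROOFS =====

-- if f² divides n with a squarefree cofactor, f is a maximal square root divisor: any g with g² ∣ n divides f
theorem key_dvd {n f g : Nat} (hn : n ≠ 0) (hf : f*f ∣ n) (hsf : Squarefree (n / (f*f)))
    (hg : g*g ∣ n) : g ∣ f := by
  have hf0 : f ≠ 0 := by rintro rfl; exact hn (Nat.eq_zero_of_zero_dvd (by simpa using hf))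
  have hg0 : g ≠ 0 := by rintro rfl; exact hn (Nat.eq_zero_of_zero_dvd (by simpa using hg))
  obtain ⟨m, hm⟩ := hf
  have hm0 : m ≠ 0 := by rintro rfl; simp at hm; exact hn hm
  have hmsq : Squarefree m := by
    rwa [hm, Nat.mul_div_cancel_left m (Nat.pos_of_ne_zero (by positivity))] at hsf
  rw [← Nat.factorization_le_iff_dvd hg0 hf0, Finsupp.le_def]
  intro p
  have h1 : m.factorization p ≤ 1 := (Nat.squarefree_iff_factorization_le_one hm0).1 hmsq p
  have h2 : (g*g).factorization p ≤ n.factorization p :=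
    (Nat.factorization_le_iff_dvd (by positivity) hn).2 hg p
  rw [hm] at h2
  rw [Nat.factorization_mul (by positivity) hm0, Nat.factorization_mul hg0 hg0,
      Nat.factorization_mul hf0 hf0] at h2
  simp only [Finsupp.coe_add, Pi.add_apply] at h2
  omega

-- the inner loop divides d*d out of n completely, moving one d into f per step
theorem bInner_spec (d : Nat) (hd : 2 ≤ d) : ∀ (fuel n f : Nat), 1 ≤ n → n ≤ fuel →
    1 ≤ (bInner fuel d n f).1 ∧ (bInner fuel d n f).1 ∣ n ∧ ¬ (d*d ∣ (bInner fuel d n f).1) ∧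
    (bInner fuel d n f).2 * (bInner fuel d n f).2 * (bInner fuel d n f).1 = f * f * n := by
  intro fuel
  induction fuel with
  | zero => intro n f h1 h2; omega
  | succ fuel ih =>
    intro n f h1 h2
    rw [bInner]
    split
    · rename_i hdvd
      have hdvd' : d*d ∣ n := Nat.dvd_iff_mod_eq_zero.2 hdvd
      have hdd : 4 ≤ d*d := by nlinarith
      have hq1 : 1 ≤ n / (d*d) := Nat.one_le_div_iff (by omega) |>.2 (Nat.le_of_dvd h1 hdvd')
      have hqlt : n / (d*d) < n := Nat.div_lt_self h1 (by omega)
      obtain ⟨ha, hb, hc, he⟩ := ih (n / (d*d)) (f*d) hq1 (by omega)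
      refine ⟨ha, hb.trans (Nat.div_dvd_of_dvd hdvd'), hc, ?_⟩
      rw [he]
      have : d * d * (n / (d*d)) = n := Nat.mul_div_cancel' hdvd'
      nlinarith [this]
    · rename_i hnd
      exact ⟨h1, dvd_refl n, fun h => hnd (Nat.dvd_iff_mod_eq_zero.1 h), rfl⟩

-- a number below d*d with no square of a prime-candidate < d dividing it is squarefree
theorem sqfree_of_small {n d : Nat} (h1 : 1 ≤ n) (hlt : n < d*d)
    (hsmall : ∀ p, 2 ≤ p → p < d → ¬ (p*p ∣ n)) : Squarefree n := by
  intro x hx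
  rcases Nat.lt_or_ge x 2 with h | h
  · interval_cases x
    · exact absurd (Nat.eq_zero_of_zero_dvd (by simpa using hx)) (by omega)
    · exact isUnit_one
  · exfalso
    rcases Nat.lt_or_ge x d with hxd | hxd
    · exact hsmall x h hxd hx
    · have : x*x ≤ n := Nat.le_of_dvd h1 hx
      nlinarith

-- invariant of the outer loop: the result F satisfies F*F*m = f*f*n for a squarefree m
theorem bOuter_spec : ∀ (fuel n f d : Nat), 2 ≤ d → 1 ≤ n → n + 1 - d ≤ fuel →
    (∀ p, 2 ≤ p → p < d → ¬ (p*p ∣ n)) →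
    ∃ m, 1 ≤ m ∧ Squarefree m ∧ (bOuter fuel n f d) * (bOuter fuel n f d) * m = f * f * n := by
  intro fuel
  induction fuel with
  | zero =>
    intro n f d hd h1 hfuel hsmall
    have hlt : n < d*d := by have := Nat.le_mul_of_pos_left d (show 0 < d by omega); omega
    exact ⟨n, h1, sqfree_of_small h1 hlt hsmall, by simp [bOuter]⟩
  | succ fuel ih =>
    intro n f d hd h1 hfuel hsmall
    rw [bOuter]
    split
    · rename_i hguard
      obtain ⟨ha, hb, hc, he⟩ := bInner_spec d hd n n f h1 le_rfl
      have hle : (bInner n d n f).1 ≤ n := Nat.le_of_dvd h1 hb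
      have hsmall' : ∀ p, 2 ≤ p → p < d+1 → ¬ (p*p ∣ (bInner n d n f).1) := by
        intro p hp2 hpd hpdvd
        rcases Nat.lt_or_ge p d with hlt | hge
        · exact hsmall p hp2 hlt (hpdvd.trans hb)
        · have : p = d := by omega
          subst this; exact hc hpdvd
      obtain ⟨m, hm1, hm2, hm3⟩ := ih (bInner n d n f).1 (bInner n d n f).2 (d+1)
        (by omega) ha (by omega) hsmall'
      exact ⟨m, hm1, hm2, by rw [hm3, he]⟩
    · rename_i hguard
      have hlt : n < d*d := by omega
      exact ⟨n, h1, sqfree_of_small h1 hlt hsmall, rfl⟩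

-- A's downward scan returns g when g² ∣ D and no larger j ≤ k has j² ∣ D
theorem aLoop_eq (D : Int) (g : Nat) (hg : 1 ≤ g) (hdvd : ((g : Int)*(g : Int)) ∣ D) :
    ∀ k, g ≤ k → (∀ j, g < j → j ≤ k → ¬ (((j : Int)*(j : Int)) ∣ D)) → aLoop D k = g := by
  intro k
  induction k with
  | zero => intro h _; omega
  | succ k ih =>
    intro hk hmax
    rw [aLoop]
    have hcast : (((k+1 : Nat) : Int)) = (k : Int) + 1 := by push_cast; ring
    split
    · rename_i h
      rw [beq_iff_eq, PySem.Int.mod_eq_zero_iff_dvd] at h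
      by_contra hne
      have hglt : g < k+1 := by omega
      exact hmax (k+1) hglt le_rfl (by rw [hcast]; ring_nf; ring_nf at h; exact h)
    · rename_i h
      rw [beq_iff_eq, PySem.Int.mod_eq_zero_iff_dvd] at h
      have hne : g ≠ k+1 := by
        rintro rfl
        exact h (by rw [← hcast] at *; ring_nf; ring_nf at hdvd; exact hdvd)
      exact ih (by omega) (fun j h1 h2 => hmax j h1 (by omega))

theorem dvd_bridge (j : Nat) (D : Int) : (((j : Int)*(j : Int)) ∣ D) ↔ (j*j ∣ D.natAbs) := by
  rw [← Int.natAbs_dvd_natAbs]; simp [Int.natAbs_mul]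

-- ===== VERDICT (by name: the statement is the Claim_ definition above) =====
theorem fund_decomp_spec : Claim_equal_fund_decomp := by
  intro D _ hPre
  unfold Spec_fund_decomp
  obtain ⟨-, hD0⟩ := hPre
  have hn0 : 1 ≤ D.natAbs := Int.natAbs_pos.2 hD0
  obtain ⟨m, hm1, hm2, hm3⟩ := bOuter_spec D.natAbs D.natAbs 1 2 le_rfl hn0 (by omega)
    (by intro p hp2 hplt; omega)
  rw [one_mul, one_mul] at hm3
  set F := bOuter D.natAbs D.natAbs 1 2 with hF
  have hF1 : 1 ≤ F := by
    rcases Nat.eq_zero_or_pos F with h | h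
    · rw [h] at hm3; simp at hm3; omega
    · exact h
  have hFdvd : F*F ∣ D.natAbs := ⟨m, hm3.symm⟩
  have hmeq : m = D.natAbs / (F*F) := by rw [← hm3, Nat.mul_div_cancel_left _ (by positivity)]
  have hsf : Squarefree (D.natAbs / (F*F)) := hmeq ▸ hm2
  have hFdvdD : ((F : Int)*(F : Int)) ∣ D := (dvd_bridge F D).2 hFdvd
  have hFle : F ≤ Nat.sqrt D.natAbs := Nat.le_sqrt.2 (Nat.le_of_dvd hn0 hFdvd)
  have hmax : ∀ j, F < j → j ≤ Nat.sqrt D.natAbs → ¬ (((j : Int)*(j : Int)) ∣ D) := by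
    intro j hj _ hdv
    have hjF : j ∣ F := key_dvd (by omega) hFdvd hsf ((dvd_bridge j D).1 hdv)
    have := Nat.le_of_dvd (by omega) hjF
    omega
  have hA : aLoop D (Nat.sqrt D.natAbs) = F := aLoop_eq D F hF1 hFdvdD (Nat.sqrt D.natAbs) hFle hmax
  show fund_decomp D = fund_decomp_alt D
  simp only [fund_decomp, fund_decomp_alt, hA, ← hF, pow_two]
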